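-- pv_equiv track=rewrite | github.com/karstenj/advent-of-code | 2022/day23/aoc_part_2.py | extend_grid
-- ===== SOURCE A (Python) =====
-- def extend_grid(grid):
--     left = False
--     right = False
--     w = len(grid[0])
--     h = len(grid)
--     for r in range(h):
--         if grid[r][w-1] == '#':
--             right = True
--         if grid[r][0] == '#':
--             left = True
--         if left and right:
--             break
--     if left:
--         w += 1
--     if right:
--         w += 1
--     new_grid = []
--     if '#' in grid[0]:
--         new_grid.append(['.' for i in range(w)])
--     for r in range(len(grid)):
--         line = []
--         if left:
--             line.append('.')
--         for c in grid[r]: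
--             line.append(c)
--         if right:
--             line.append('.')
--         new_grid.append(line)
--     if '#' in grid[h-1]:
--         new_grid.append(['.' for i in range(w)])
--     return new_grid
-- ===== SOURCE B (Python) =====
-- def extend_grid(grid):
--     top = '#' in grid[0]
--     bottom = '#' in grid[-1]
--     left = any(row[0] == '#' for row in grid)
--     right = any(row[-1] == '#' for row in grid)
--     h, w = len(grid), len(grid[0])
--     return [[grid[i - top][j - left]
--              if top <= i < h + top and left <= j < w + left
--              else '.'
--              for j in range(w + left + right)]
--             for i in range(h + top + bottom)]
-- ===== Notes on version B (the rewrite author's own statement) =====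
-- stated objective: alternative
-- what changed: B computes the four border flags up front (membership/any over whole rows) and then generates the padded grid in one shot as an index formula over the full output rectangle (out[i][j] = grid[i-top][j-left] or '.'), replacing A's early-break flag loop, conditional per-row appends and separate empty-row insertions.
-- outside the precondition, e.g. on extend_grid([[''], ['', 'x']]): A returns [[''], ['', 'x']], B returns [[''], ['']]
import Mathlib
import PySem

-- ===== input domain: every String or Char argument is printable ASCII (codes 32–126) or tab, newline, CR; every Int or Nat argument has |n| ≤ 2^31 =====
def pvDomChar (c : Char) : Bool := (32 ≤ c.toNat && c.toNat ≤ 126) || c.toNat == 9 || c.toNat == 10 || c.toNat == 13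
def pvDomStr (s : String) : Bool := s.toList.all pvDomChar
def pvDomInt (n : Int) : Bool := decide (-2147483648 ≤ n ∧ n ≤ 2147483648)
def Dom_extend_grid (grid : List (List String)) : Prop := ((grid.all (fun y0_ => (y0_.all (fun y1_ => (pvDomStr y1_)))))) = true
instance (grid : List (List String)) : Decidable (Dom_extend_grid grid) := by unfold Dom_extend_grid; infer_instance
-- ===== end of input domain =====

-- B pads a grid with a blank border row/column on each side that contains a '#',
-- built as one index formula over the output rectangle instead of A's early-break
-- flag loop with conditional appends (objective: alternative decomposition).

-- ===== PORT A =====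
-- early-break flag loop: for r in range(h): set right/left; break when both
def agFlags (grid : List (List String)) (w : Nat) : List Nat → Bool × Bool → Bool × Bool
  | [], st => st
  | i :: rs, (left, right) =>
    let right := if (PySem.List.pyGet? (grid.getD i []) ((w : Int) - 1)).getD "" = "#" then true else right
    let left := if (PySem.List.pyGet? (grid.getD i []) 0).getD "" = "#" then true else left
    if left && right then (left, right) else agFlags grid w rs (left, right)

def extend_grid (grid : List (List String)) : List (List String) :=
  let w0 := (grid.headD []).length
  let h := grid.length
  let fl := agFlags grid w0 (List.range h) (false, false)
  let left := fl.1
  let right := fl.2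
  let w := w0 + (if left then 1 else 0) + (if right then 1 else 0)
  let top := if "#" ∈ grid.headD [] then [List.replicate w ("." : String)] else []
  let mid := (List.range h).map (fun r =>
      (if left then ["."] else []) ++ grid.getD r [] ++ (if right then ["."] else []))
  let bot := if "#" ∈ grid.getD (h - 1) [] then [List.replicate w ("." : String)] else []
  top ++ mid ++ bot

-- ===== PORT B =====
def extend_grid_alt (grid : List (List String)) : List (List String) :=
  let top := decide ("#" ∈ grid.headD [])
  let bottom := decide ("#" ∈ grid.getLastD [])
  let left := grid.any (fun row => (PySem.List.pyGet? row 0).getD "" = "#")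
  let right := grid.any (fun row => (PySem.List.pyGet? row (-1)).getD "" = "#")
  let h := grid.length
  let w := (grid.headD []).length
  let t := if top then 1 else 0
  let l := if left then 1 else 0
  let b := if bottom then 1 else 0
  let r := if right then 1 else 0
  (List.range (h + t + b)).map (fun i =>
    (List.range (w + l + r)).map (fun j =>
      if t ≤ i ∧ i < h + t ∧ l ≤ j ∧ j < w + l
      then (grid.getD (i - t) []).getD (j - l) ""
      else "."))

-- ===== PRECONDITION & SPEC =====
-- Pre_ excludes the empty grid and non-rectangular grids: A raises IndexError on
-- empty grids, empty rows and rows shorter than the first row, and on ragged grids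
-- with longer rows A's right-border test reads column w-1 instead of the row end —
-- an artefact of its fixed-width scan that no caller of a grid function relies on.
def Pre_extend_grid (grid : List (List String)) : Prop :=
  grid ≠ [] ∧ 0 < (grid.headD []).length ∧
    ∀ row ∈ grid, row.length = (grid.headD []).length
instance (grid : List (List String)) : Decidable (Pre_extend_grid grid) := by
  unfold Pre_extend_grid; infer_instance

def pvWitness_extend_grid : List (List String) := [[".", "#"], ["#", "."]]

def Spec_extend_grid (grid : List (List String)) (out : List (List String)) : Prop := out = extend_grid_alt grid
instance (grid : List (List String)) (out : List (List String)) : Decidable (Spec_extend_grid grid out) := by unfold Spec_extend_grid; infer_instance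

-- ===== CLAIM (what is proved, stated in full; the proofs are below) =====
def Claim_equal_extend_grid : Prop := ∀ (grid : List (List String)), Dom_extend_grid grid → Pre_extend_grid grid → Spec_extend_grid grid (extend_grid grid)

-- ===== LEMMAS AND PROOFS =====

-- A's break-on-both loop computes the disjunction of the per-row tests.
theorem agFlags_eq (grid : List (List String)) (w : Nat) :
    ∀ (idxs : List Nat) (l r : Bool),
      agFlags grid w idxs (l, r) =
        (l || idxs.any (fun i => (PySem.List.pyGet? (grid.getD i []) 0).getD "" = "#"),
         r || idxs.any (fun i => (PySem.List.pyGet? (grid.getD i []) ((w : Int) - 1)).getD "" = "#")) := by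
  intro idxs
  induction idxs with
  | nil => intro l r; simp [agFlags]
  | cons i rs ih =>
    intro l r
    by_cases hR : (PySem.List.pyGet? (grid.getD i []) ((w : Int) - 1)).getD "" = "#" <;>
      by_cases hL : (PySem.List.pyGet? (grid.getD i []) 0).getD "" = "#" <;>
        cases l <;> cases r <;>
          simp_all [agFlags]

theorem range_any {α : Type} (xs : List α) (d : α) (f : α → Bool) :
    (List.range xs.length).any (fun i => f (xs.getD i d)) = xs.any f := by
  rw [Bool.eq_iff_iff]
  simp only [List.any_eq_true, List.mem_range]
  constructor
  · rintro ⟨i, hi, hf⟩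
    exact ⟨xs[i], List.getElem_mem _, by rwa [List.getD_eq_getElem _ _ hi] at hf⟩
  · rintro ⟨x, hx, hf⟩
    obtain ⟨i, hi, rfl⟩ := List.getElem_of_mem hx
    exact ⟨i, hi, by rwa [List.getD_eq_getElem _ _ hi]⟩

theorem range_map {α β : Type} (xs : List α) (d : α) (f : α → β) :
    (List.range xs.length).map (fun i => f (xs.getD i d)) = xs.map f := by
  apply List.ext_getElem
  · simp
  · intro i h1 h2
    have hi : i < xs.length := by simpa using h2
    simp only [List.getElem_map, List.getElem_range]
    rw [List.getD_eq_getElem _ _ hi]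

-- last-column index equals Python's -1 index on a row of the stated width
theorem pyGet_last (row : List String) (w : Nat) (hw : 0 < w) (hlen : row.length = w) :
    PySem.List.pyGet? row ((w : Int) - 1) = PySem.List.pyGet? row (-1) := by
  have h1 : ((w : Int) - 1) = ((w - 1 : Nat) : Int) := by omega
  rw [h1, PySem.List.pyGet?_natCast, PySem.List.pyGet?_neg_one]
  rw [List.getLast?_eq_getElem?, hlen]

theorem getD_last {α : Type} (xs : List α) (d : α) (_h : xs ≠ []) :
    xs.getD (xs.length - 1) d = xs.getLastD d := by
  rw [List.getLastD_eq_getLast?, List.getLast?_eq_getElem?]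
  rfl

-- a row regenerated cell by cell is itself
theorem range_getD_self {α : Type} (xs : List α) (d : α) :
    (List.range xs.length).map (fun j => xs.getD j d) = xs := by
  have := range_map xs d (fun x => x)
  simpa using this

theorem map_range_add {α : Type} (a b : Nat) (f : Nat → α) :
    (List.range (a + b)).map f =
      (List.range a).map f ++ (List.range b).map (fun i => f (a + i)) := by
  rw [List.range_add, List.map_append, List.map_map]
  rfl

-- the combinatorial core: the index formula over the output rectangle equals
-- top-blank ++ padded rows ++ bottom-blank
theorem build_eq (grid : List (List String)) (w : Nat) (_hw : 0 < w)
    (hrow : ∀ row ∈ grid, row.length = w)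
    (t l b r : Nat) (_t1 : t ≤ 1) (_l1 : l ≤ 1) (hb : b ≤ 1) (_r1 : r ≤ 1) :
    (List.range (grid.length + t + b)).map (fun i =>
      (List.range (w + l + r)).map (fun j =>
        if t ≤ i ∧ i < grid.length + t ∧ l ≤ j ∧ j < w + l
        then (grid.getD (i - t) []).getD (j - l) ""
        else ".")) =
      (List.range t).map (fun _ => List.replicate (w + l + r) ("." : String)) ++
      grid.map (fun row =>
        List.replicate l ("." : String) ++ row ++ List.replicate r ("." : String)) ++
      (List.range b).map (fun _ => List.replicate (w + l + r) ("." : String)) := by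
  rw [show grid.length + t + b = t + (grid.length + b) from by omega,
    map_range_add t (grid.length + b), map_range_add grid.length b,
    List.append_assoc]
  congr 1
  · -- top blank rows
    apply List.map_congr_left
    intro i hi
    simp only [List.mem_range] at hi
    apply List.ext_getElem
    · simp
    · intro j h1 h2
      simp only [List.getElem_map, List.getElem_range, List.getElem_replicate]
      rw [if_neg (by omega)]
  congr 1
  · -- middle rows
    rw [← range_map grid [] (fun row =>
      List.replicate l ("." : String) ++ row ++ List.replicate r ("." : String))]
    apply List.map_congr_left
    intro k hk
    simp only [List.mem_range] at hk
    have hrk : (grid.getD k []).length = w := by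
      rw [List.getD_eq_getElem _ _ hk]; exact hrow _ (List.getElem_mem _)
    have hred : (List.range (w + l + r)).map (fun j =>
        if t ≤ t + k ∧ t + k < grid.length + t ∧ l ≤ j ∧ j < w + l
        then (grid.getD (t + k - t) []).getD (j - l) "" else (".":String)) =
        (List.range (w + l + r)).map (fun j =>
        if l ≤ j ∧ j < w + l then (grid.getD k []).getD (j - l) "" else (".":String)) := by
      apply List.map_congr_left
      intro j _
      rw [show t + k - t = k from by omega]
      by_cases hj : l ≤ j ∧ j < w + l
      · rw [if_pos (by omega), if_pos hj]
      · rw [if_neg (by omega), if_neg hj]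
    rw [hred,
      show w + l + r = l + (w + r) from by omega,
      map_range_add l (w + r), map_range_add w r, List.append_assoc]
    congr 1
    · -- left pad
      apply List.ext_getElem
      · simp
      · intro j h1 h2
        simp only [List.getElem_map, List.getElem_range, List.getElem_replicate]
        have : j < l := by simpa using h1
        rw [if_neg (by omega)]
    congr 1
    · -- the row itself
      conv_rhs => rw [← range_getD_self (grid.getD k []) ""]
      rw [hrk]
      apply List.map_congr_left
      intro j hj
      simp only [List.mem_range] at hj
      rw [if_pos (by omega), show l + j - l = j from by omega]
    · -- right pad
      apply List.ext_getElem
      · simp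
      · intro j h1 h2
        simp only [List.getElem_map, List.getElem_range, List.getElem_replicate]
        rw [if_neg (by omega)]
  · -- bottom blank rows
    apply List.map_congr_left
    intro i hi
    simp only [List.mem_range] at hi
    apply List.ext_getElem
    · simp
    · intro j h1 h2
      simp only [List.getElem_map, List.getElem_range, List.getElem_replicate]
      rw [if_neg (by omega)]

-- ===== VERDICT (by name: the statement is the Claim_ definition above) =====
theorem extend_grid_spec : Claim_equal_extend_grid := by
  intro grid _ hpre
  obtain ⟨hne, hw, hrow⟩ := hpre
  unfold Spec_extend_grid extend_grid extend_grid_alt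
  simp only []
  set w := (grid.headD []).length with hwdef
  -- A's flag loop = B's any-scans
  have hfl : agFlags grid w (List.range grid.length) (false, false) =
      (grid.any (fun row => (PySem.List.pyGet? row 0).getD "" = "#"),
       grid.any (fun row => (PySem.List.pyGet? row (-1)).getD "" = "#")) := by
    rw [agFlags_eq]
    simp only [Bool.false_or]
    congr 1
    · exact range_any grid [] (fun row => decide ((PySem.List.pyGet? row 0).getD "" = "#"))
    · have key : ∀ i, i < grid.length →
          PySem.List.pyGet? (grid.getD i []) ((w : Int) - 1) =
          PySem.List.pyGet? (grid.getD i []) (-1) := fun i hi =>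
        pyGet_last _ w hw (by rw [List.getD_eq_getElem _ _ hi]; exact hrow _ (List.getElem_mem _))
      have h2 : (List.range grid.length).any
          (fun i => decide ((PySem.List.pyGet? (grid.getD i []) ((w : Int) - 1)).getD "" = "#")) =
          (List.range grid.length).any
          (fun i => decide ((PySem.List.pyGet? (grid.getD i []) (-1)).getD "" = "#")) := by
        rw [Bool.eq_iff_iff]
        simp only [List.any_eq_true, List.mem_range, decide_eq_true_eq]
        exact ⟨fun ⟨i, hi, hf⟩ => ⟨i, hi, by rw [← key i hi]; exact hf⟩,
               fun ⟨i, hi, hf⟩ => ⟨i, hi, by rw [key i hi]; exact hf⟩⟩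
      rw [h2]
      exact range_any grid [] (fun row => decide ((PySem.List.pyGet? row (-1)).getD "" = "#"))
  rw [hfl]
  -- name the four flags
  set left := grid.any (fun row => (PySem.List.pyGet? row 0).getD "" = "#") with hld
  set right := grid.any (fun row => (PySem.List.pyGet? row (-1)).getD "" = "#") with hrd
  -- A's bottom test reads grid[h-1]; B reads grid[-1]
  have hbot : grid.getD (grid.length - 1) [] = grid.getLastD [] := getD_last grid [] hne
  rw [hbot]
  -- reshape A's three pieces into the replicate form and apply build_eq
  have hmid : (List.range grid.length).map (fun r =>
      (if left then [(".":String)] else []) ++ grid.getD r [] ++ (if right then ["."] else [])) =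
      grid.map (fun row =>
        List.replicate (if left then 1 else 0) ("." : String) ++ row ++
        List.replicate (if right then 1 else 0) ("." : String)) := by
    rw [← range_map grid [] (fun row =>
      List.replicate (if left then 1 else 0) ("." : String) ++ row ++
      List.replicate (if right then 1 else 0) ("." : String))]
    apply List.map_congr_left
    intro i _
    cases left <;> cases right <;> simp
  rw [hmid]
  rw [build_eq grid w hw (fun row h => hrow row h)
      (if decide ("#" ∈ grid.headD []) = true then 1 else 0)
      (if left then 1 else 0)
      (if decide ("#" ∈ grid.getLastD []) = true then 1 else 0)
      (if right then 1 else 0)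
      (by split_ifs <;> omega) (by split_ifs <;> omega)
      (by split_ifs <;> omega) (by split_ifs <;> omega)]
  congr 1
  · congr 1
    by_cases hmem : "#" ∈ grid.head?.getD ([] : List String) <;>
      simp [hmem]
  · by_cases hmem : "#" ∈ grid.getLast?.getD ([] : List String) <;>
      simp [List.getLastD_eq_getLast?, hmem]
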